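-- pv_equiv track=rewrite | github.com/doomsday-vpo/text_processing | character_multiplier.py | char_multiplier
-- ===== SOURCE A (Python) =====
-- def char_multiplier(str1, str2):
--     total_sum = 0
--     min_length = min(len(str1), len(str2))
--
--     for i in range(min_length):
--         total_sum += ord(str1[i]) * ord(str2[i])
--
--     if len(str1) > len(str2):
--         for i in range(min_length, len(str1)):
--             total_sum += ord(str1[i])
--     elif len(str2) > len(str1):
--         for i in range(min_length, len(str2)):
--             total_sum += ord(str2[i])
--
--     return total_sum
-- ===== SOURCE B (Python) =====
-- def char_multiplier(str1, str2):
--     # One pass over both strings padded with chr(1): ord(chr(1)) == 1, so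
--     # positions past the shorter string contribute ord(c) * 1 = ord(c),
--     # removing the length comparison and separate tail loops.
--     n = max(len(str1), len(str2))
--     pad = chr(1)
--     s1 = str1.ljust(n, pad)
--     s2 = str2.ljust(n, pad)
--     return sum(ord(a) * ord(b) for a, b in zip(s1, s2))
-- ===== Notes on version B (the rewrite author's own statement) =====
-- stated objective: idiomatic
-- what changed: B pads both strings to equal length with chr(1) (whose ord is 1) and sums ord(a)*ord(b) in a single zipped pass, eliminating A's min_length computation, three-way length branch and separate tail loops.
import Mathlib
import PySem

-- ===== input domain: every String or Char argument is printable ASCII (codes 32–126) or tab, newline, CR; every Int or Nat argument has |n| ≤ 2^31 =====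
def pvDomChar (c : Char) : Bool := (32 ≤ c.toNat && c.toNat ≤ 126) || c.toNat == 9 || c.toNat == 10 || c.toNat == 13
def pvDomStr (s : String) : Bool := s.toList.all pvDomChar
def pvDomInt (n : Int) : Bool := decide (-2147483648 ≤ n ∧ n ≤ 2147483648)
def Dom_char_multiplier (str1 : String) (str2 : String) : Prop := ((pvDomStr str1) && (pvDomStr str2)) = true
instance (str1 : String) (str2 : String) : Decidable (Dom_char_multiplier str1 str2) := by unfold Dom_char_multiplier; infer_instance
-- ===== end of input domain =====

-- B pads both strings to equal length with chr(1) and sums ord(a)*ord(b) in a single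
-- zipped pass, removing A's length branch and tail loops (idiomatic; same cost).


-- ===== PORT A =====
def char_multiplier (str1 : String) (str2 : String) : Int :=
  let l1 := str1.toList
  let l2 := str2.toList
  let minLength : Int := min (l1.length : Int) (l2.length : Int)
  let total : Int := (PySem.List.pyRange 0 minLength 1).foldl
    (fun acc i => acc + ((PySem.List.pyGetD l1 i ' ').toNat : Int) * ((PySem.List.pyGetD l2 i ' ').toNat : Int)) 0
  if (l1.length : Int) > (l2.length : Int) then
    (PySem.List.pyRange minLength (l1.length : Int) 1).foldl
      (fun acc i => acc + ((PySem.List.pyGetD l1 i ' ').toNat : Int)) total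
  else if (l2.length : Int) > (l1.length : Int) then
    (PySem.List.pyRange minLength (l2.length : Int) 1).foldl
      (fun acc i => acc + ((PySem.List.pyGetD l2 i ' ').toNat : Int)) total
  else total

-- ===== PORT B =====
def char_multiplier_alt (str1 : String) (str2 : String) : Int :=
  let n := max str1.toList.length str2.toList.length
  let s1 := str1.toList ++ List.replicate (n - str1.toList.length) (Char.ofNat 1)
  let s2 := str2.toList ++ List.replicate (n - str2.toList.length) (Char.ofNat 1)
  ((s1.zip s2).map (fun p => ((p.1.toNat : Int) * (p.2.toNat : Int)))).sum

-- ===== PRECONDITION & SPEC =====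
def Spec_char_multiplier (str1 : String) (str2 : String) (out : Int) : Prop := out = char_multiplier_alt str1 str2
instance (str1 : String) (str2 : String) (out : Int) : Decidable (Spec_char_multiplier str1 str2 out) := by unfold Spec_char_multiplier; infer_instance

-- ===== CLAIM (what is proved, stated in full; the proofs are below) =====
def Claim_equal_char_multiplier : Prop := ∀ (str1 : String) (str2 : String), Dom_char_multiplier str1 str2 → Spec_char_multiplier str1 str2 (char_multiplier str1 str2)

-- ===== LEMMAS AND PROOFS =====

def pvG (p : Char × Char) : Int := ((p.1.toNat : Int) * (p.2.toNat : Int))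

-- padding on the left list only
lemma pv_zip_repl_left : ∀ l : List Char,
    (((List.replicate l.length (Char.ofNat 1)).zip l).map pvG).sum
      = (l.map (fun c => (c.toNat : Int))).sum := by
  intro l
  induction l with
  | nil => simp
  | cons b bs ih =>
      simp [List.replicate_succ, pvG, ih, (by decide : (Char.ofNat 1).toNat = 1)]

lemma pv_zip_repl_right : ∀ l : List Char,
    ((l.zip (List.replicate l.length (Char.ofNat 1))).map pvG).sum
      = (l.map (fun c => (c.toNat : Int))).sum := by
  intro l
  induction l with
  | nil => simp
  | cons b bs ih =>
      simp [List.replicate_succ, pvG, ih, (by decide : (Char.ofNat 1).toNat = 1)]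

-- the padded single-pass sum splits into the zipped prefix plus the two tails
lemma pv_padded_sum : ∀ (l1 l2 : List Char),
    (((l1 ++ List.replicate (max l1.length l2.length - l1.length) (Char.ofNat 1)).zip
       (l2 ++ List.replicate (max l1.length l2.length - l2.length) (Char.ofNat 1))).map pvG).sum
    = ((l1.zip l2).map pvG).sum
      + ((l1.drop (min l1.length l2.length)).map (fun c => (c.toNat : Int))).sum
      + ((l2.drop (min l1.length l2.length)).map (fun c => (c.toNat : Int))).sum := by
  intro l1
  induction l1 with
  | nil =>
      intro l2
      simpa using pv_zip_repl_left l2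
  | cons a as ih =>
      intro l2
      cases l2 with
      | nil =>
          simpa using pv_zip_repl_right (a :: as)
      | cons b bs =>
          have h1 : max (a :: as).length (b :: bs).length - (a :: as).length
              = max as.length bs.length - as.length := by simp
          have h2 : max (a :: as).length (b :: bs).length - (b :: bs).length
              = max as.length bs.length - bs.length := by simp
          have h3 : min (a :: as).length (b :: bs).length = min as.length bs.length + 1 := by
            simp
          rw [h1, h2, h3]
          simp only [List.cons_append, List.zip_cons_cons, List.map_cons, List.sum_cons,
            List.drop_succ_cons]
          rw [ih bs]
          ring

-- the map over the main-loop range is the zipped product list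
lemma pv_main_map (l1 l2 : List Char) :
    ((PySem.List.pyRange 0 ((min l1.length l2.length : Nat) : Int) 1).map
       (fun i => ((PySem.List.pyGetD l1 i ' ').toNat : Int) * ((PySem.List.pyGetD l2 i ' ').toNat : Int)))
    = (l1.zip l2).map pvG := by
  apply List.ext_getElem
  · simp [PySem.List.length_pyRange_one]
    omega
  · intro k h1 h2
    have hk : k < min l1.length l2.length := by
      simpa [PySem.List.length_pyRange_one] using h1
    have hk1 : k < l1.length := by omega
    have hk2 : k < l2.length := by omega
    simp [PySem.List.getElem_pyRange_one, PySem.List.pyGetD_natCast, pvG,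
      List.getD_eq_getElem?_getD, List.getElem?_eq_getElem hk1, List.getElem?_eq_getElem hk2,
      List.getElem_zip]

-- the map over a tail range is the dropped tail
lemma pv_tail_map (l : List Char) (m : Nat) :
    ((PySem.List.pyRange (m : Int) (l.length : Int) 1).map
       (fun i => ((PySem.List.pyGetD l i ' ').toNat : Int)))
    = (l.drop m).map (fun c => (c.toNat : Int)) := by
  have h := PySem.List.map_pyGetD_pyRange' (xs := l) (d := ' ') (a := (m : Int))
    (by positivity)
  have hc : (fun i => ((PySem.List.pyGetD l i ' ').toNat : Int))
      = (fun c : Char => (c.toNat : Int)) ∘ (fun i => PySem.List.pyGetD l i ' ') := rfl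
  rw [hc, ← List.map_map, h]
  simp

-- A in sum form: zipped prefix plus both tails (at most one tail is nonempty)
lemma pv_A_sum (s1 s2 : String) :
    char_multiplier s1 s2
    = ((s1.toList.zip s2.toList).map pvG).sum
      + ((s1.toList.drop (min s1.toList.length s2.toList.length)).map (fun c => (c.toNat : Int))).sum
      + ((s2.toList.drop (min s1.toList.length s2.toList.length)).map (fun c => (c.toNat : Int))).sum := by
  unfold char_multiplier
  set l1 := s1.toList with hl1
  set l2 := s2.toList with hl2
  have hmin : min ((l1.length : Int)) ((l2.length : Int)) = ((min l1.length l2.length : Nat) : Int) := by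
    simp [Nat.cast_min]
  simp only [hmin]
  split_ifs with hgt hlt
  · -- len1 > len2 : tail from l1, l2's drop is empty
    have hm : min l1.length l2.length = l2.length := by omega
    rw [PySem.List.foldl_add, PySem.List.foldl_add, pv_main_map,
      pv_tail_map l1 (min l1.length l2.length), hm, List.drop_length]
    simp
  · -- len2 > len1
    have hm : min l1.length l2.length = l1.length := by omega
    rw [PySem.List.foldl_add, PySem.List.foldl_add, pv_main_map,
      pv_tail_map l2 (min l1.length l2.length), hm, List.drop_length]
    simp
  · -- equal lengths
    have hm : l1.length = l2.length := by omega
    rw [PySem.List.foldl_add, pv_main_map,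
      show min l1.length l2.length = l1.length by omega, List.drop_length,
      show l1.length = l2.length from hm, List.drop_length]
    simp

-- ===== VERDICT (by name: the statement is the Claim_ definition above) =====
theorem char_multiplier_spec : Claim_equal_char_multiplier := by
  intro s1 s2 _
  unfold Spec_char_multiplier char_multiplier_alt
  rw [pv_A_sum]
  simpa [pvG] using (pv_padded_sum s1.toList s2.toList).symm
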